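-- pv_equiv track=rewrite | github.com/emreyolcu/rewriting-collatz | prover/sat.py | luby
-- ===== SOURCE A (Python) =====
-- def luby(n):
--     for k in range(1, 32):
--         if n == 2**k - 1:
--             return 2**(k - 1)
--     k = 1
--     while True:
--         if 2**(k - 1) <= n < 2**k - 1:
--             return luby(n - 2**(k - 1) + 1)
--         k += 1
-- ===== SOURCE B (Python) =====
-- def luby(n):
--     # Iterative, bit-arithmetic version: instead of scanning exponents k by
--     # trial, compute the highest power of two h <= n+1 via bit_length; if
--     # n+1 is exactly a power of two return its half, else reduce n and loop.
--     while True: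
--         m = n + 1
--         h = 1 << (m.bit_length() - 1)  # highest power of two <= m
--         if h == m:
--             return m >> 1
--         n -= h - 1
-- ===== Notes on version B (the rewrite author's own statement) =====
-- stated objective: alternative
-- what changed: Replaced the capped equality scan plus unbounded bracket search and tail recursion by a single iterative loop that computes the highest power of two below n+1 with bit_length, returning half of n+1 when n+1 is a power of two and reducing n otherwise; Pre_ excludes n <= 0, where A loops forever.
-- outside the precondition, e.g. on luby(0): A does not finish within the time limit, B returns 0
import Mathlib
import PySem

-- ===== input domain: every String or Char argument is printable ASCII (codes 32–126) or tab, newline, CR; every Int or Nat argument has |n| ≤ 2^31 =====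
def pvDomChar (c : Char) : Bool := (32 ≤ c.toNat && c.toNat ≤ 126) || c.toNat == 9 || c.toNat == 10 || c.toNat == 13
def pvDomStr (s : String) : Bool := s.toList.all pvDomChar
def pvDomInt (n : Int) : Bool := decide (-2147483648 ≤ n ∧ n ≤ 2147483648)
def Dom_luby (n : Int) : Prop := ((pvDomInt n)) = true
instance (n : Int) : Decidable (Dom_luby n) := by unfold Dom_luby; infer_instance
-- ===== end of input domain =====

-- B replaces A's exponent scans and tail recursion by one loop using bit_length; objective: alternative.

-- ===== PORT A =====
-- `for k in range(1, 32): if n == 2**k - 1: return 2**(k-1)`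
def lubyEq (n : Int) : List Int → Option Int
  | [] => none
  | k :: ks => if n = 2 ^ k.toNat - 1 then some (2 ^ (k.toNat - 1)) else lubyEq n ks

-- the `while True` search for k with 2**(k-1) <= n < 2**k - 1; fuel models the
-- unbounded loop (never exhausted on Pre_; A diverges exactly where it would be)
def lubyWhile (n : Int) : Int → Nat → Option Int
  | _, 0 => none
  | k, fuel+1 =>
      if 2 ^ (k - 1).toNat ≤ n ∧ n < 2 ^ k.toNat - 1 then some (n - 2 ^ (k - 1).toNat + 1)
      else lubyWhile n (k + 1) fuel

def lubyGo : Nat → Int → Int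
  | 0, _ => 0
  | fuel+1, n =>
    match lubyEq n (PySem.List.pyRange 1 32 1) with
    | some v => v
    | none =>
      match lubyWhile n 1 40 with
      | some n' => lubyGo fuel n'
      | none => 0

def luby (n : Int) : Int := lubyGo 64 n

-- ===== PORT B =====
-- `1 << (m.bit_length() - 1)` = 2 ^ Nat.log2 m.toNat (exact for m ≥ 1);
-- `m >> 1` = m / 2 (exact for m ≥ 0); fuel models the while-True loop
def lubyAltGo : Nat → Int → Int
  | 0, _ => 0
  | fuel+1, n =>
    let m := n + 1
    let h : Int := 2 ^ Nat.log2 m.toNat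
    if h = m then m / 2
    else lubyAltGo fuel (n - (h - 1))

def luby_alt (n : Int) : Int := lubyAltGo 64 n

-- ===== PRECONDITION & SPEC =====
-- Pre_ excludes n ≤ 0: there the Python A loops forever (no value is returned).
def Pre_luby (n : Int) : Prop := 1 ≤ n
instance (n : Int) : Decidable (Pre_luby n) := by unfold Pre_luby; infer_instance
def pvWitness_luby : Int := 5

def Spec_luby (n : Int) (out : Int) : Prop := out = luby_alt n
instance (n : Int) (out : Int) : Decidable (Spec_luby n out) := by unfold Spec_luby; infer_instance

-- ===== CLAIM (what is proved, stated in full; the proofs are below) =====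
def Claim_equal_luby : Prop := ∀ (n : Int), Dom_luby n → Pre_luby n → Spec_luby n (luby n)

-- ===== LEMMAS AND PROOFS =====

theorem lubyEq_none (n : Int) (l : List Int) (h : ∀ k ∈ l, n ≠ 2 ^ k.toNat - 1) :
    lubyEq n l = none := by
  induction l with
  | nil => rfl
  | cons k ks ih =>
      simp only [lubyEq]
      rw [if_neg (h k (by simp))]
      exact ih (fun j hj => h j (by simp [hj]))

theorem lubyEq_pow (L : Nat) (h1 : 1 ≤ L) (h2 : L ≤ 31) :
    lubyEq ((2:Int) ^ L - 1) (PySem.List.pyRange 1 32 1) = some (2 ^ (L - 1)) := by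
  interval_cases L <;> decide

theorem lubyWhile_reach (n : Int) (K : Int) (hK1 : 1 ≤ K)
    (hbr : 2 ^ (K - 1).toNat ≤ n ∧ n < 2 ^ K.toNat - 1)
    (hlow : ∀ j : Int, 1 ≤ j → j < K → ¬(2 ^ (j - 1).toNat ≤ n ∧ n < 2 ^ j.toNat - 1)) :
    ∀ fuel (k : Int), 1 ≤ k → k ≤ K → K.toNat - k.toNat < fuel →
      lubyWhile n k fuel = some (n - 2 ^ (K - 1).toNat + 1) := by
  intro fuel
  induction fuel with
  | zero => intro k _ _ h; omega
  | succ f ih =>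
      intro k hk1 hkK hfk
      simp only [lubyWhile]
      by_cases hk : k = K
      · subst hk; rw [if_pos hbr]
      · rw [if_neg (hlow k hk1 (lt_of_le_of_ne hkK hk))]
        exact ih (k + 1) (by omega) (by omega) (by omega)

theorem two_pow_int_le (a b : Nat) (h : a ≤ b) : (2:Int) ^ a ≤ 2 ^ b :=
  pow_le_pow_right₀ (by norm_num) h

-- main step-by-step correspondence
theorem lubyGo_eq_alt : ∀ fuel (n : Int), 1 ≤ n → n ≤ 2 ^ 31 → n.toNat < 2 ^ fuel →
    lubyGo fuel n = lubyAltGo fuel n := by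
  intro fuel
  induction fuel with
  | zero => intro n h1 _ hf; simp at hf; omega
  | succ f ih =>
      intro n h1 h31 hf
      simp only [lubyGo, lubyAltGo]
      generalize hLg : Nat.log2 (n + 1).toNat = L
      have h0 : (n + 1).toNat ≠ 0 := by omega
      have hc1 : ((2 ^ L : Nat) : Int) = (2:Int) ^ L := by push_cast; ring
      have hc2 : ((2 ^ (L+1) : Nat) : Int) = (2:Int) ^ (L+1) := by push_cast; ring
      have hmn : (((n+1).toNat : Nat) : Int) = n + 1 := by omega
      have hlo : (2:Int) ^ L ≤ n + 1 := by
        have h := Nat.log2_self_le h0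
        rw [hLg] at h
        have : ((2 ^ L : Nat) : Int) ≤ (((n+1).toNat : Nat) : Int) := by exact_mod_cast h
        omega
      have hhi : n + 1 < (2:Int) ^ (L + 1) := by
        have h := Nat.lt_log2_self (n := (n+1).toNat)
        rw [hLg] at h
        have : (((n+1).toNat : Nat) : Int) < ((2 ^ (L+1) : Nat) : Int) := by exact_mod_cast h
        omega
      have hpow21 : (2:Int) ^ (L + 1) = 2 ^ L * 2 := by rw [pow_succ]
      have hL1 : 1 ≤ L := by
        by_contra hc
        have hL0 : L = 0 := by omega
        rw [hL0] at hhi; simp at hhi; omega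
      have hL31 : L ≤ 31 := by
        by_contra hc
        have h32 : (2:Int) ^ 32 ≤ 2 ^ L := two_pow_int_le 32 L (by omega)
        have h31' : (2:Int) ^ 31 + 1 < 2 ^ 32 := by norm_num
        omega
      by_cases hp : (2:Int) ^ L = n + 1
      · -- n + 1 is a power of two: both return 2^(L-1)
        have heq : lubyEq n (PySem.List.pyRange 1 32 1) = some (2 ^ (L - 1)) := by
          have hn : n = 2 ^ L - 1 := by omega
          rw [hn]; exact lubyEq_pow L hL1 hL31
        rw [heq, if_pos hp]
        show (2:Int) ^ (L - 1) = (n + 1) / 2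
        have hsp : (2:Int) ^ L = 2 ^ (L - 1) * 2 := by
          rw [← pow_succ]; congr 1; omega
        rw [← hp, hsp]
        exact (Int.mul_ediv_cancel _ (by norm_num)).symm
      · -- not a power of two: both reduce to n' = n - 2^L + 1
        have hlo' : (2:Int) ^ L ≤ n := by omega
        have hnone : lubyEq n (PySem.List.pyRange 1 32 1) = none := by
          apply lubyEq_none
          intro k hk hcck
          have hkpow : (2:Int) ^ k.toNat = n + 1 := by omega
          have hk2 : (n + 1).toNat = 2 ^ k.toNat := by
            have hcc : ((n+1).toNat : Int) = ((2 ^ k.toNat : Nat) : Int) := by push_cast; omega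
            exact_mod_cast hcc
          have hLk : L = k.toNat := by rw [← hLg, hk2, Nat.log2_two_pow]
          rw [hLk] at hp; exact hp hkpow
        rw [hnone]
        have hT1 : ((L:Int) + 1 - 1).toNat = L := by omega
        have hT2 : ((L:Int) + 1).toNat = L + 1 := by omega
        have hbr : 2 ^ ((L:Int) + 1 - 1).toNat ≤ n ∧ n < 2 ^ ((L:Int)+1).toNat - 1 := by
          rw [hT1, hT2]; exact ⟨hlo', by omega⟩
        have hw : lubyWhile n 1 40 = some (n - 2 ^ ((L:Int) + 1 - 1).toNat + 1) := by
          apply lubyWhile_reach n ((L:Int) + 1) (by omega) hbr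
          · intro j hj1 hjK hcc
            obtain ⟨hja, hjb⟩ := hcc
            have hjle : j.toNat ≤ L := by omega
            have hmono : (2:Int) ^ j.toNat ≤ 2 ^ L := two_pow_int_le _ _ hjle
            omega
          · omega
          · omega
          · omega
        rw [hw, hT1, if_neg hp]
        have harg : n - (2 ^ L - 1) = n - 2 ^ L + 1 := by ring
        rw [harg]
        have hLf : L ≤ f := by
          by_contra hc
          have hmono : (2:Int) ^ (f + 1) ≤ 2 ^ L := two_pow_int_le (f + 1) L (by omega)
          have hcf : ((2 ^ (f+1) : Nat) : Int) = (2:Int) ^ (f+1) := by push_cast; ring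
          have hff : (n.toNat : Int) < ((2 ^ (f+1) : Nat) : Int) := by exact_mod_cast hf
          omega
        apply ih
        · omega
        · have hm31 := two_pow_int_le L 31 hL31
          have : ((2:Int))^31 = 2147483648 := by norm_num
          omega
        · have hLe : (2:Int) ^ L ≤ 2 ^ f := two_pow_int_le L f hLf
          have hcf : ((2 ^ f : Nat) : Int) = (2:Int) ^ f := by push_cast; ring
          have hgoal : ((n - 2 ^ L + 1).toNat : Int) < ((2 ^ f : Nat) : Int) := by omega
          exact_mod_cast hgoal

-- ===== VERDICT (by name: the statement is the Claim_ definition above) =====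
theorem luby_spec : Claim_equal_luby := by
  intro n hdom hpre
  unfold Spec_luby
  have hd : -2147483648 ≤ n ∧ n ≤ 2147483648 := by
    have := hdom; unfold Dom_luby pvDomInt at this; exact of_decide_eq_true this
  show lubyGo 64 n = lubyAltGo 64 n
  apply lubyGo_eq_alt 64 n hpre
  · have : (2147483648 : Int) = 2 ^ 31 := by norm_num
    omega
  · have : n.toNat ≤ 2 ^ 31 := by omega
    have : (2 : Nat) ^ 31 < 2 ^ 64 := by norm_num
    omega
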